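-- pv_equiv track=rewrite | github.com/sakshi-rastogi/SeqMaster | 4_Mutation_Detection.py | detect_mutations
-- ===== SOURCE A (Python) =====
-- def detect_mutations(seq1, seq2):
--     mutations = []
--     length = max(len(seq1), len(seq2))
--
--     for i in range(length):
--         # Check for substitutions
--         if i < len(seq1) and i < len(seq2):
--             if seq1[i] != seq2[i]:
--                 mutations.append((i + 1, 'substitution', seq1[i], seq2[i]))
--
--         # Check for insertions or deletions
--         elif i < len(seq1):  # Deletion in seq2
--             mutations.append((i + 1, 'deletion', seq1[i], '-'))
--         elif i < len(seq2):  # Insertion in seq1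
--             mutations.append((i + 1, 'insertion', '-', seq2[i]))
--
--     return mutations
-- ===== SOURCE B (Python) =====
-- def detect_mutations(seq1, seq2):
--     # Divide and conquer over the position range: classify one position at the
--     # leaves, recursively solve each half and concatenate (left half first, so
--     # order is preserved).  Depth is O(log n).
--     def emit(i):
--         if i < len(seq1) and i < len(seq2):
--             return [(i + 1, 'substitution', seq1[i], seq2[i])] if seq1[i] != seq2[i] else []
--         if i < len(seq1):
--             return [(i + 1, 'deletion', seq1[i], '-')]
--         return [(i + 1, 'insertion', '-', seq2[i])]
--
--     def solve(lo, hi):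
--         if hi - lo == 0:
--             return []
--         if hi - lo == 1:
--             return emit(lo)
--         mid = (lo + hi) // 2
--         return solve(lo, mid) + solve(mid, hi)
--
--     return solve(0, max(len(seq1), len(seq2)))
-- ===== Notes on version B (the rewrite author's own statement) =====
-- stated objective: alternative
-- what changed: A's single linear max-length loop with per-iteration guards is replaced by a divide-and-conquer recursion over the position range: classify one position at the leaves, solve each half recursively and concatenate left-then-right.
import Mathlib
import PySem

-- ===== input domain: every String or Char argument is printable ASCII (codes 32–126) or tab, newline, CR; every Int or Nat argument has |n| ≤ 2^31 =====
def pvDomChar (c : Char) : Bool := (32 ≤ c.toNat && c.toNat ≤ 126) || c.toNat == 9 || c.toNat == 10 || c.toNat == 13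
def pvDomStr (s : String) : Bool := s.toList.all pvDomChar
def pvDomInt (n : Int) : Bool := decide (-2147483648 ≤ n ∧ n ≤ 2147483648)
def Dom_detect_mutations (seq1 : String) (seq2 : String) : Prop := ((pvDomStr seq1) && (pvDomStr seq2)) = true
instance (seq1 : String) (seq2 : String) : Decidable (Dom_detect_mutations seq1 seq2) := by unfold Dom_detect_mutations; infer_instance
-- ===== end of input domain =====

-- B replaces A's single linear max-length loop by a divide-and-conquer recursion over the position
-- range (classify one position at the leaves, solve each half, concatenate); objective: alternative.

-- ===== PORT A =====
-- Python's seq[i] (a 1-char string) is represented as String.singleton of the indexed char;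
-- the index is guarded in range by the branch condition, so pyGetD with a dummy default is exact.
def detect_mutations (seq1 : String) (seq2 : String) : List (Int × String × String × String) :=
  let l1 := seq1.toList
  let l2 := seq2.toList
  let length : Int := max (l1.length : Int) (l2.length : Int)
  (PySem.List.pyRange 0 length 1).foldl (fun mutations i =>
    if i < (l1.length : Int) ∧ i < (l2.length : Int) then
      if PySem.List.pyGetD l1 i ' ' ≠ PySem.List.pyGetD l2 i ' ' then
        mutations ++ [(i + 1, "substitution",
          String.singleton (PySem.List.pyGetD l1 i ' '), String.singleton (PySem.List.pyGetD l2 i ' '))]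
      else mutations
    else if i < (l1.length : Int) then
      mutations ++ [(i + 1, "deletion", String.singleton (PySem.List.pyGetD l1 i ' '), "-")]
    else if i < (l2.length : Int) then
      mutations ++ [(i + 1, "insertion", "-", String.singleton (PySem.List.pyGetD l2 i ' '))]
    else mutations) []

-- ===== PORT B =====
-- Source B's emit(i): classify a single position (only ever called with 0 ≤ i < max of the lengths).
def pvBEmit (l1 l2 : List Char) (i : Int) : List (Int × String × String × String) :=
  if i < (l1.length : Int) ∧ i < (l2.length : Int) then
    if PySem.List.pyGetD l1 i ' ' ≠ PySem.List.pyGetD l2 i ' ' then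
      [(i + 1, "substitution",
        String.singleton (PySem.List.pyGetD l1 i ' '), String.singleton (PySem.List.pyGetD l2 i ' '))]
    else []
  else if i < (l1.length : Int) then
    [(i + 1, "deletion", String.singleton (PySem.List.pyGetD l1 i ' '), "-")]
  else
    [(i + 1, "insertion", "-", String.singleton (PySem.List.pyGetD l2 i ' '))]

-- Source B's solve(lo, hi): divide and conquer on the index range.  The first branch is Python's
-- 'hi - lo == 0' widened to '≤ 0' only as a totality guard (solve is never called with hi < lo).
def pvSolve (l1 l2 : List Char) (lo hi : Int) : List (Int × String × String × String) :=
  if hi - lo ≤ 0 then []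
  else if hi - lo = 1 then pvBEmit l1 l2 lo
  else
    let mid := PySem.Int.floordiv (lo + hi) 2
    pvSolve l1 l2 lo mid ++ pvSolve l1 l2 mid hi
termination_by (hi - lo).toNat
decreasing_by
  all_goals
    rename_i h0 h1
    have hb : lo + 1 ≤ PySem.Int.floordiv (lo + hi) 2 := by
      rw [PySem.Int.le_floordiv_iff_mul_le (by omega)]; omega
    have hb2 : PySem.Int.floordiv (lo + hi) 2 < hi := by
      rw [PySem.Int.floordiv_lt_iff_lt_mul (by omega)]; omega
    omega

def detect_mutations_alt (seq1 : String) (seq2 : String) : List (Int × String × String × String) :=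
  let l1 := seq1.toList
  let l2 := seq2.toList
  pvSolve l1 l2 0 (max (l1.length : Int) (l2.length : Int))

-- ===== PRECONDITION & SPEC =====
def Spec_detect_mutations (seq1 : String) (seq2 : String) (out : List (Int × String × String × String)) : Prop := out = detect_mutations_alt seq1 seq2
instance (seq1 : String) (seq2 : String) (out : List (Int × String × String × String)) : Decidable (Spec_detect_mutations seq1 seq2 out) := by unfold Spec_detect_mutations; infer_instance

-- ===== CLAIM (what is proved, stated in full; the proofs are below) =====
def Claim_equal_detect_mutations : Prop := ∀ (seq1 : String) (seq2 : String), Dom_detect_mutations seq1 seq2 → Spec_detect_mutations seq1 seq2 (detect_mutations seq1 seq2)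

-- ===== LEMMAS AND PROOFS =====

-- per-index emission of A's loop body
def pvEmit (l1 l2 : List Char) (i : Int) : List (Int × String × String × String) :=
  if i < (l1.length : Int) ∧ i < (l2.length : Int) then
    if PySem.List.pyGetD l1 i ' ' ≠ PySem.List.pyGetD l2 i ' ' then
      [(i + 1, "substitution",
        String.singleton (PySem.List.pyGetD l1 i ' '), String.singleton (PySem.List.pyGetD l2 i ' '))]
    else []
  else if i < (l1.length : Int) then
    [(i + 1, "deletion", String.singleton (PySem.List.pyGetD l1 i ' '), "-")]
  else if i < (l2.length : Int) then
    [(i + 1, "insertion", "-", String.singleton (PySem.List.pyGetD l2 i ' '))]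
  else []

-- A's foldl accumulates exactly the concatenation of the per-index emissions
theorem pvFoldA (l1 l2 : List Char) (xs : List Int)
    (acc : List (Int × String × String × String)) :
    xs.foldl (fun mutations i =>
      if i < (l1.length : Int) ∧ i < (l2.length : Int) then
        if PySem.List.pyGetD l1 i ' ' ≠ PySem.List.pyGetD l2 i ' ' then
          mutations ++ [(i + 1, "substitution",
            String.singleton (PySem.List.pyGetD l1 i ' '), String.singleton (PySem.List.pyGetD l2 i ' '))]
        else mutations
      else if i < (l1.length : Int) then
        mutations ++ [(i + 1, "deletion", String.singleton (PySem.List.pyGetD l1 i ' '), "-")]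
      else if i < (l2.length : Int) then
        mutations ++ [(i + 1, "insertion", "-", String.singleton (PySem.List.pyGetD l2 i ' '))]
      else mutations) acc = acc ++ xs.flatMap (pvEmit l1 l2) := by
  induction xs generalizing acc with
  | nil => simp
  | cons x xs ih =>
    simp only [List.foldl_cons, List.flatMap_cons, ih, pvEmit]
    split_ifs <;> simp

-- B's divide and conquer equals the flatMap of its leaf emission over the range
theorem pvSolveFlat (l1 l2 : List Char) (lo hi : Int) (hle : lo ≤ hi) :
    pvSolve l1 l2 lo hi = (PySem.List.pyRange lo hi 1).flatMap (pvBEmit l1 l2) := by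
  generalize hn : (hi - lo).toNat = n
  induction n using Nat.strong_induction_on generalizing lo hi with
  | _ n ih =>
    rw [pvSolve]
    by_cases h0 : hi - lo ≤ 0
    · rw [if_pos h0]
      have : hi ≤ lo := by omega
      simp [PySem.List.pyRange, Int.toNat_of_nonpos (by omega : hi - lo ≤ 0)]
    · rw [if_neg h0]
      by_cases h1 : hi - lo = 1
      · rw [if_pos h1]
        have : hi = lo + 1 := by omega
        subst this
        rw [PySem.List.pyRange_one_cons (by omega : lo < lo + 1)]
        simp [PySem.List.pyRange_one_eq_nil (by omega : lo + 1 ≤ lo + 1)]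
      · rw [if_neg h1]
        have hb : lo + 1 ≤ PySem.Int.floordiv (lo + hi) 2 := by
          rw [PySem.Int.le_floordiv_iff_mul_le (by omega)]; omega
        have hb2 : PySem.Int.floordiv (lo + hi) 2 < hi := by
          rw [PySem.Int.floordiv_lt_iff_lt_mul (by omega)]; omega
        set mid := PySem.Int.floordiv (lo + hi) 2 with hmid
        show pvSolve l1 l2 lo mid ++ pvSolve l1 l2 mid hi = _
        rw [ih (mid - lo).toNat (by omega) lo mid (by omega) rfl,
            ih (hi - mid).toNat (by omega) mid hi (by omega) rfl,
            ← List.flatMap_append,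
            PySem.List.pyRange_one_append lo mid hi (by omega) (by omega)]

-- both leaf emissions agree on every in-range index
theorem pvEmitEq (l1 l2 : List Char) (i : Int)
    (hi : i < max (l1.length : Int) (l2.length : Int)) :
    pvEmit l1 l2 i = pvBEmit l1 l2 i := by
  unfold pvEmit pvBEmit
  split_ifs with h1 h2 h3 h4 <;> try rfl
  omega

-- ===== VERDICT (by name: the statement is the Claim_ definition above) =====
theorem detect_mutations_spec : Claim_equal_detect_mutations := by
  intro seq1 seq2 _
  unfold Spec_detect_mutations detect_mutations detect_mutations_alt
  simp only []
  rw [pvFoldA, List.nil_append,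
      pvSolveFlat _ _ 0 _ (by positivity)]
  apply List.flatMap_congr
  intro i hi
  rw [PySem.List.mem_pyRange_one] at hi
  exact pvEmitEq _ _ _ (by omega)
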